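-- pv_equiv track=rewrite | github.com/GLeonov/peptide-fusion-scan | post-hoc-unmatched-processing/extract_unmatched_peptides_post-hoc.py | _create_combinations_with_isoleucines
-- ===== SOURCE A (Python) =====
-- import itertools
--
-- def _create_combinations_with_isoleucines(peptide):
--     """
--     Performs all possible combinations of string reassignment of L to I.
--     """
--     count = peptide.count('L')
--     product = [''.join(seq) for seq in itertools.product("01", repeat=count)]
--     positions = [pos for pos, char in enumerate(peptide) if char == 'L']
--     peptides = []
--     for combo in product:
--         partitioned_peptide = list(peptide)
--         for pos, item in enumerate(positions):
--             if combo[pos] == '1':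
--                 partitioned_peptide[item] = 'I'
--         peptides.append(''.join(partitioned_peptide))
--     return peptides
-- ===== SOURCE B (Python) =====
-- def _create_combinations_with_isoleucines(peptide):
--     """
--     Performs all possible combinations of string reassignment of L to I.
--     One left-to-right pass: each 'L' doubles the partial results ('L' branch
--     before 'I' branch, so the leftmost L is most significant, matching
--     itertools.product order).
--     """
--     result = ['']
--     for c in peptide:
--         if c == 'L':
--             result = [p + x for p in result for x in ('L', 'I')]
--         else:
--             result = [p + c for p in result]
--     return result
-- ===== Notes on version B (the rewrite author's own statement) =====
-- stated objective: simpler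
-- what changed: Replaces the count/itertools.product/positions/index-rewrite pipeline with a single left-to-right pass that doubles the partial results at each L character (L branch before I), building the same list in the same order incrementally.
import Mathlib
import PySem

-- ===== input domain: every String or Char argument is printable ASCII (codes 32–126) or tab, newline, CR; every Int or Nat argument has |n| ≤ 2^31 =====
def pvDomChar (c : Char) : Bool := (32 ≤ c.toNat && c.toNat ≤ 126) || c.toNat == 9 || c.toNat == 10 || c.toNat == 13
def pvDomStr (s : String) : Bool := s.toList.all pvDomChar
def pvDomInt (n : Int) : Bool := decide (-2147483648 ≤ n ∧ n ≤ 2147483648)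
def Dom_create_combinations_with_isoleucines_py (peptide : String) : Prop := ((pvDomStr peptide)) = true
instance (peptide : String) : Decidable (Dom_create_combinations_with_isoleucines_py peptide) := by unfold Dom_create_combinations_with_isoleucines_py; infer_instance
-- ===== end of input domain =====

-- B replaces A's count/itertools.product/positions/index-rewrite pipeline with a single
-- left-to-right pass that doubles the partial results at each 'L' (objective: simpler).

-- ===== PORT A =====
-- itertools.product("01", repeat=count): first coordinate varies slowest ('0' before '1')
def pvProductBits : Nat → List (List Char)
  | 0 => [[]]
  | n + 1 => ['0', '1'].flatMap (fun b => (pvProductBits n).map (fun s => b :: s))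

-- [pos for pos, char in enumerate(peptide) if char == 'L']  (counter-carrying loop)
def pvPosLoop : Nat → List Char → List Nat
  | _, [] => []
  | pos, c :: rest =>
      if c = 'L' then pos :: pvPosLoop (pos + 1) rest else pvPosLoop (pos + 1) rest

-- 'for pos, item in enumerate(positions): if combo[pos] == '1': partitioned[item] = 'I''
def pvSetLoop (combo : List Char) (part : List Char) (pos : Nat) : List Nat → List Char
  | [] => part
  | item :: rest =>
      pvSetLoop combo
        (if PySem.List.pyGet? combo (pos : Int) = some '1' then part.set item 'I' else part)
        (pos + 1) rest

def create_combinations_with_isoleucines_py (peptide : String) : List String :=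
  let cs := peptide.toList
  let count := cs.count 'L'          -- peptide.count('L'): 1-char substring count = char count
  let product := pvProductBits count -- [''.join(seq) for seq in itertools.product("01", repeat=count)]
  let positions := pvPosLoop 0 cs
  -- 'peptides = []; for combo in product: … peptides.append(…)'
  product.foldl (fun peptides combo =>
    peptides ++ [String.ofList (pvSetLoop combo cs 0 positions)]) []

-- ===== PORT B =====
def create_combinations_with_isoleucines_py_alt (peptide : String) : List String :=
  peptide.toList.foldl (fun result c =>
    if c == 'L' then result.flatMap (fun p => [p ++ "L", p ++ "I"])
    else result.map (fun p => p.push c)) [""]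

-- ===== PRECONDITION & SPEC =====
def Spec_create_combinations_with_isoleucines_py (peptide : String) (out : List String) : Prop := out = create_combinations_with_isoleucines_py_alt peptide
instance (peptide : String) (out : List String) : Decidable (Spec_create_combinations_with_isoleucines_py peptide out) := by unfold Spec_create_combinations_with_isoleucines_py; infer_instance

-- ===== CLAIM (what is proved, stated in full; the proofs are below) =====
def Claim_equal_create_combinations_with_isoleucines_py : Prop := ∀ (peptide : String), Dom_create_combinations_with_isoleucines_py peptide → Spec_create_combinations_with_isoleucines_py peptide (create_combinations_with_isoleucines_py peptide)

-- ===== LEMMAS AND PROOFS =====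

-- canonical recursive characterisation both ports are reduced to
def pvCore : List Char → List (List Char)
  | [] => [[]]
  | c :: rest =>
      if c = 'L' then (pvCore rest).map (fun t => 'L' :: t) ++ (pvCore rest).map (fun t => 'I' :: t)
      else (pvCore rest).map (fun t => c :: t)

theorem pvFoldl_append_map (f : List Char → String) :
    ∀ (l : List (List Char)) (acc : List String),
      l.foldl (fun a x => a ++ [f x]) acc = acc ++ l.map f := by
  intro l
  induction l with
  | nil => simp
  | cons x xs ih => intro acc; simp [List.foldl, ih]

theorem pvSetLoop_shift (combo : List Char) (c : Char) :
    ∀ (items : List Nat) (part : List Char) (pos : Nat),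
      pvSetLoop combo (c :: part) pos (items.map Nat.succ) =
        c :: pvSetLoop combo part pos items := by
  intro items
  induction items with
  | nil => intro part pos; rfl
  | cons i rest ih =>
      intro part pos
      simp only [List.map, pvSetLoop]
      rw [show (c :: part).set (Nat.succ i) 'I' = c :: part.set i 'I' from rfl]
      split_ifs <;> exact ih _ _

theorem pvSetLoop_combo_shift (b : Char) (combo : List Char) :
    ∀ (items : List Nat) (part : List Char) (pos : Nat),
      pvSetLoop (b :: combo) part (pos + 1) items = pvSetLoop combo part pos items := by
  intro items
  induction items with
  | nil => intro part pos; rfl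
  | cons i rest ih =>
      intro part pos
      simp only [pvSetLoop]
      rw [show PySem.List.pyGet? (b :: combo) ((pos + 1 : Nat) : Int)
            = PySem.List.pyGet? combo (pos : Int) by
        simp [PySem.List.pyGet?_natCast]]
      split_ifs <;> exact ih _ _

theorem pvPosLoop_succ : ∀ (cs : List Char) (n : Nat),
    pvPosLoop (n + 1) cs = (pvPosLoop n cs).map Nat.succ := by
  intro cs
  induction cs with
  | nil => intro n; rfl
  | cons c rest ih =>
      intro n
      by_cases h : c = 'L' <;> simp [pvPosLoop, h, ih]

-- A's combo loop produces exactly pvCore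
theorem pvA_core : ∀ (cs : List Char),
    (pvProductBits (cs.count 'L')).map (fun combo => pvSetLoop combo cs 0 (pvPosLoop 0 cs))
      = pvCore cs := by
  intro cs
  induction cs with
  | nil => rfl
  | cons c rest ih =>
      by_cases h : c = 'L'
      · subst h
        have hcount : (('L' : Char) :: rest).count 'L' = rest.count 'L' + 1 := by
          simp
        have hpos : pvPosLoop 0 ('L' :: rest) = 0 :: (pvPosLoop 0 rest).map Nat.succ := by
          simp [pvPosLoop, pvPosLoop_succ]
        have hstep : ∀ (b : Char) (combo : List Char),
            pvSetLoop (b :: combo) ('L' :: rest) 0 (0 :: (pvPosLoop 0 rest).map Nat.succ)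
              = (if b = '1' then 'I' else 'L') :: pvSetLoop combo rest 0 (pvPosLoop 0 rest) := by
          intro b combo
          simp only [pvSetLoop, Nat.cast_zero, PySem.List.pyGet?_zero_cons, Option.some.injEq,
            List.set]
          split_ifs with hb
          · rw [pvSetLoop_shift]
            exact congrArg _ (pvSetLoop_combo_shift b combo (pvPosLoop 0 rest) rest 0)
          · rw [pvSetLoop_shift]
            exact congrArg _ (pvSetLoop_combo_shift b combo (pvPosLoop 0 rest) rest 0)
        rw [hcount, hpos]
        simp only [pvProductBits, List.flatMap_cons, List.flatMap_nil, List.map_append,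
          List.map_map, List.append_nil]
        rw [pvCore]
        rw [if_pos rfl, ← ih, List.map_map, List.map_map]
        congr 1
        all_goals
          apply List.map_congr_left
          intro combo _
          simp [Function.comp, hstep]
      · have hcount : (c :: rest).count 'L' = rest.count 'L' := by
          simp [h]
        have hpos : pvPosLoop 0 (c :: rest) = (pvPosLoop 0 rest).map Nat.succ := by
          simp [pvPosLoop, h, pvPosLoop_succ]
        rw [hcount, hpos, pvCore, if_neg h, ← ih, List.map_map]
        apply List.map_congr_left
        intro combo _
        simp [Function.comp, pvSetLoop_shift]

theorem pvB_core : ∀ (cs : List Char) (res : List String),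
    cs.foldl (fun result c =>
        if c == 'L' then result.flatMap (fun p => [p ++ "L", p ++ "I"])
        else result.map (fun p => p.push c)) res
      = res.flatMap (fun p => (pvCore cs).map (fun t => p ++ String.ofList t)) := by
  intro cs
  induction cs with
  | nil =>
      intro res
      have : ∀ p : String, p ++ String.ofList [] = p := by
        intro p; apply String.toList_inj.mp; simp
      simp [pvCore, this]
  | cons c rest ih =>
      intro res
      rw [List.foldl_cons, ih]
      by_cases h : c = 'L'
      · subst h
        have inner : (fun p : String =>
              [p ++ "L", p ++ "I"].flatMap (fun q => (pvCore rest).map (fun t => q ++ String.ofList t)))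
            = fun p => (pvCore ('L' :: rest)).map (fun t => p ++ String.ofList t) := by
          funext p
          rw [pvCore, if_pos rfl]
          simp only [List.flatMap_cons, List.flatMap_nil, List.append_nil, List.map_append,
            List.map_map]
          congr 1
          all_goals
            apply List.map_congr_left
            intro t _
            apply String.toList_inj.mp
            simp
        rw [if_pos (by simp), List.flatMap_assoc, inner]
      · have inner : (fun p : String =>
              (pvCore rest).map (fun t => p.push c ++ String.ofList t))
            = fun p => (pvCore (c :: rest)).map (fun t => p ++ String.ofList t) := by
          funext p
          rw [pvCore, if_neg h, List.map_map]
          apply List.map_congr_left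
          intro t _
          apply String.toList_inj.mp
          simp
        rw [if_neg (by simp [h]), List.flatMap_map, inner]

-- ===== VERDICT (by name: the statement is the Claim_ definition above) =====
theorem create_combinations_with_isoleucines_py_spec : Claim_equal_create_combinations_with_isoleucines_py := by
  intro peptide _
  show create_combinations_with_isoleucines_py peptide = _
  unfold create_combinations_with_isoleucines_py create_combinations_with_isoleucines_py_alt
  rw [pvFoldl_append_map, pvB_core, List.nil_append, ← pvA_core]
  simp only [List.flatMap_cons, List.flatMap_nil, List.append_nil, List.map_map]
  apply List.map_congr_left
  intro combo _
  simp [Function.comp]
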